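-- pv_equiv track=rewrite | github.com/pypi-data/pypi-mirror-174 | packages/xrmath/xrmath-0.0.4-py3-none-any.whl/xrmath/xrmath.py | XE
-- ===== SOURCE A (Python) =====
-- def XE(source: str, m=2) -> str:
--     """
--     全称: XEncryption
--     用于加密文本(Unicode)
--     示例:
--     >>> XE("XEncryption")
--     '.`9ob;z:8vu9'
--     >>> XE("China")
--     'c2v5rb'
--     """
--
--     def _(num: int) -> str:
--         res = ""
--         if num >= 64: res += '1'; num -= 64
--         else: res += '0'
--         if num >= 32: res += '1'; num -= 32
--         else: res += '0'
--         if num >= 16: res += '1'; num -= 16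
--         else: res += '0'
--         if num >= 8: res += '1'; num -= 8
--         else: res += '0'
--         if num >= 4: res += '1'; num -= 4
--         else: res += '0'
--         if num >= 2: res += '1'; num -= 2
--         else: res += '0'
--         if num == 1: return res + '1'
--         else: return res + '0'
--     k = lambda x: str(sum([int(x[i]) * 2 ** (len(x) - 1 - i) for i in range(len(x))]))
--
--     l = [_(ord(i)) for i in source]
--
--     l_ = [i[-1] + i[0:6] if i[-1] != '0' else 'x' + i[0:6] for i in l]
--     res = "".join([chr(int(k(str(i)))) if 'x' not in i else chr(int(k(str(i)[1:]))) for i in l_])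
--     r = [chr(ord(res[i]) - m) if i % 2 == 1 else
--                 chr(ord(res[i]) + m) for i in range(len(res))]
--     r.insert(len(r) ** 2 % 9, chr(96 + m))
--
--     return "".join(r)
-- ===== SOURCE B (Python) =====
-- def XE(source: str, m=2) -> str:
--     # One integer pass: the bit-string dance in A is a 7-bit rotate-right-by-1
--     # of each code point; shift alternately by +/- m and insert the marker char.
--     out = []
--     for i, ch in enumerate(source):
--         o = ord(ch)
--         w = 64 * (o % 2) + o // 2      # 7-bit rotate-right of the code (codes < 128)
--         out.append(chr(w + m if i % 2 == 0 else w - m))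
--     out.insert(len(out) ** 2 % 9, chr(96 + m))
--     return "".join(out)
-- ===== Notes on version B (the rewrite author's own statement) =====
-- stated objective: simpler
-- what changed: B drops A's bit-string construction, rotation-by-slicing and sum-of-powers re-parsing entirely: the whole dance is a 7-bit rotate-right-by-1, so B computes w = 64*(o%2) + o//2 on integers and fuses the rotate and the alternating +/-m shift into one enumerate pass.
import Mathlib
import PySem

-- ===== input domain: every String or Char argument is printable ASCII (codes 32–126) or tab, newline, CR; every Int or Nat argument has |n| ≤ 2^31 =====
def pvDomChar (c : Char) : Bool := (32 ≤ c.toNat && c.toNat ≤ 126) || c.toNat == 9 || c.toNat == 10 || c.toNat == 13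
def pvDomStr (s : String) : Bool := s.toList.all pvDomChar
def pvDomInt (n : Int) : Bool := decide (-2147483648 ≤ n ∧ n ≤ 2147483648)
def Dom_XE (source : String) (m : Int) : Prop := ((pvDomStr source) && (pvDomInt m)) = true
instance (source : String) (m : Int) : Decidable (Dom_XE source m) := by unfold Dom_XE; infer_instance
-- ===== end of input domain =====

-- B replaces A's bit-string construction / rotation-by-slicing / re-parsing by a single
-- integer pass (the whole dance is a 7-bit rotate-right-by-1 of the code): objective 'simpler'.

-- ===== PORT A =====
-- chr(n): exact for valid non-surrogate code points; Pre_XE excludes the inputs where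
-- Python's chr raises (ValueError) or yields a lone surrogate (no Lean Char exists).
def pyChr (n : Int) : Char := Char.ofNat n.toNat

-- Python helper _ : builds the 7-bit string greedily (state = (res, num))
def XE_u (num0 : Int) : List Char :=
  let p : List Char × Int := if num0 ≥ 64 then (['1'], num0 - 64) else (['0'], num0)
  let p := if p.2 ≥ 32 then (p.1 ++ ['1'], p.2 - 32) else (p.1 ++ ['0'], p.2)
  let p := if p.2 ≥ 16 then (p.1 ++ ['1'], p.2 - 16) else (p.1 ++ ['0'], p.2)
  let p := if p.2 ≥ 8 then (p.1 ++ ['1'], p.2 - 8) else (p.1 ++ ['0'], p.2)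
  let p := if p.2 ≥ 4 then (p.1 ++ ['1'], p.2 - 4) else (p.1 ++ ['0'], p.2)
  let p := if p.2 ≥ 2 then (p.1 ++ ['1'], p.2 - 2) else (p.1 ++ ['0'], p.2)
  if p.2 = 1 then p.1 ++ ['1'] else p.1 ++ ['0']

-- Python lambda k : str(sum(int(x[i]) * 2 ** (len(x)-1-i) for i in range(len(x))))
-- (len(x)-1-i ported with Nat subtraction: exact, since range gives 0 ≤ i < len(x))
def XE_k (x : List Char) : List Char :=
  PySem.Int.toChars
    (((PySem.List.pyRange 0 (x.length : Int) 1).map (fun i =>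
        ((PySem.Int.ofChars? [PySem.List.pyGetD x i ' ']).getD 0)
          * 2 ^ (x.length - 1 - i.toNat))).foldl (· + ·) 0)

def XE (source : String) (m : Int) : String :=
  let l := source.toList.map (fun i => XE_u ((i.toNat : Int)))
  let l_ := l.map (fun i =>
    if PySem.List.pyGetD i (-1) ' ' ≠ '0'
    then PySem.List.pyGetD i (-1) ' ' :: PySem.List.slice i (some 0) (some 6)
    else 'x' :: PySem.List.slice i (some 0) (some 6))
  let res := l_.map (fun i =>
    if ¬ i.contains 'x'
    then pyChr ((PySem.Int.ofChars? (XE_k i)).getD 0)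
    else pyChr ((PySem.Int.ofChars? (XE_k (PySem.List.slice i (some 1) none))).getD 0))
  let r := (PySem.List.pyRange 0 (res.length : Int) 1).map (fun i =>
    if PySem.Int.mod i 2 = 1
    then pyChr (((PySem.List.pyGetD res i ' ').toNat : Int) - m)
    else pyChr (((PySem.List.pyGetD res i ' ').toNat : Int) + m))
  String.ofList (PySem.List.insert r ((r.length ^ 2 % 9 : Nat) : Int) (pyChr (96 + m)))

-- ===== PORT B =====
def XE_alt (source : String) (m : Int) : String :=
  let out := (PySem.List.enumerate source.toList 0).map (fun p =>
    let o : Int := (p.2.toNat : Int)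
    let w : Int := 64 * PySem.Int.mod o 2 + PySem.Int.floordiv o 2
    Char.ofNat (if PySem.Int.mod p.1 2 = 0 then w + m else w - m).toNat)
  String.ofList (PySem.List.insert out ((out.length ^ 2 % 9 : Nat) : Int)
    (Char.ofNat (96 + m).toNat))

-- ===== PRECONDITION & SPEC =====
-- a valid, non-surrogate chr argument
def pvOkCode (n : Int) : Bool := decide ((0 ≤ n ∧ n < 55296) ∨ (57343 < n ∧ n ≤ 1114111))
-- the code point the shift step feeds to chr at position p.1 for character p.2
def pvShifted (m : Int) (p : Int × Char) : Int :=
  let w : Int := ((64 * (p.2.toNat % 2) + p.2.toNat / 2 : Nat) : Int)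
  if PySem.Int.mod p.1 2 = 0 then w + m else w - m
-- Pre_XE excludes the m for which some chr argument (the marker 96+m or a shifted
-- rotated code) leaves chr's range — there Python's chr raises ValueError — or is a
-- lone surrogate, which Python returns but a Lean Char/String cannot represent.
def Pre_XE (source : String) (m : Int) : Prop :=
  pvOkCode (96 + m) = true ∧
  ∀ p ∈ PySem.List.enumerate source.toList 0, pvOkCode (pvShifted m p) = true
instance (source : String) (m : Int) : Decidable (Pre_XE source m) := by
  unfold Pre_XE; infer_instance
def pvWitness_XE : String × Int := ("China", 2)
def Spec_XE (source : String) (m : Int) (out : String) : Prop := out = XE_alt source m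
instance (source : String) (m : Int) (out : String) : Decidable (Spec_XE source m out) := by
  unfold Spec_XE; infer_instance

-- ===== CLAIM (what is proved, stated in full; the proofs are below) =====
def Claim_equal_XE : Prop := ∀ (source : String) (m : Int),
  Dom_XE source m → Pre_XE source m → Spec_XE source m (XE source m)

-- ===== LEMMAS AND PROOFS =====

-- A's bit-string/rotate/re-parse pipeline collapses to a 7-bit rotate-right-by-1
set_option maxRecDepth 10000 in
theorem rotChar_eq : ∀ o : Fin 128,
    (fun i =>
      if ¬ i.contains 'x'
      then pyChr ((PySem.Int.ofChars? (XE_k i)).getD 0)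
      else pyChr ((PySem.Int.ofChars? (XE_k (PySem.List.slice i (some 1) none))).getD 0))
    ((fun i =>
      if PySem.List.pyGetD i (-1) ' ' ≠ '0'
      then PySem.List.pyGetD i (-1) ' ' :: PySem.List.slice i (some 0) (some 6)
      else 'x' :: PySem.List.slice i (some 0) (some 6))
     (XE_u ((o.val : Int))))
    = Char.ofNat (64 * (o.val % 2) + o.val / 2) := by decide

theorem pv_enumerate_map {α β : Type} (h : α → β) (xs : List α) (s : Int) :
    PySem.List.enumerate (xs.map h) s
      = (PySem.List.enumerate xs s).map (fun p => (p.1, h p.2)) := by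
  induction xs generalizing s with
  | nil => simp [PySem.List.enumerate_nil]
  | cons x xs ih => simp [PySem.List.enumerate_cons, ih]

theorem pv_index_loop_eq_enumerate {α β : Type} (xs : List α) (d : α) (F : Int → α → β) :
    (PySem.List.pyRange 0 (xs.length : Int) 1).map (fun i => F i (PySem.List.pyGetD xs i d))
      = (PySem.List.enumerate xs 0).map (fun p => F p.1 p.2) := by
  rw [PySem.List.enumerate_eq_map_pyRange (xs := xs) d, List.map_map]
  simp [PySem.List.len_eq]

theorem pv_toNat_ofNat (n : Nat) (h : n < 55296) : (Char.ofNat n).toNat = n := by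
  unfold Char.ofNat
  rw [dif_pos (by exact Or.inl h : n.isValidChar)]
  simp [Char.ofNatAux, Char.toNat]

-- the alternating-shift step, A's form vs B's form
theorem pv_shift_eq (m i : Int) (c : Char) (hc : c.toNat < 128) :
    (if PySem.Int.mod i 2 = 1
     then pyChr ((((Char.ofNat (64 * (c.toNat % 2) + c.toNat / 2)).toNat : Nat) : Int) - m)
     else pyChr ((((Char.ofNat (64 * (c.toNat % 2) + c.toNat / 2)).toNat : Nat) : Int) + m))
    = (fun p : Int × Char =>
        let o : Int := (p.2.toNat : Int)
        let w : Int := 64 * PySem.Int.mod o 2 + PySem.Int.floordiv o 2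
        Char.ofNat (if PySem.Int.mod p.1 2 = 0 then w + m else w - m).toNat) (i, c) := by
  simp only
  rw [pv_toNat_ofNat _ (by omega)]
  have hW : (64 : Int) * PySem.Int.mod ((c.toNat : Nat) : Int) 2
        + PySem.Int.floordiv ((c.toNat : Nat) : Int) 2
      = (((64 * (c.toNat % 2) + c.toNat / 2 : Nat)) : Int) := by
    rw [PySem.Int.mod_eq_emod_of_pos (by omega), PySem.Int.floordiv_eq_ediv_of_pos (by omega)]
    omega
  rw [hW]
  have hmi : PySem.Int.mod i 2 = i % 2 := PySem.Int.mod_eq_emod_of_pos (by omega)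
  rw [hmi]
  by_cases h0 : i % 2 = 0
  · rw [if_neg (by omega), if_pos h0]; rfl
  · rw [if_pos (by omega), if_neg h0]; rfl

theorem XE_eq_alt (source : String) (m : Int) (hdom : Dom_XE source m) :
    XE source m = XE_alt source m := by
  have hall : ∀ c ∈ source.toList, pvDomChar c = true := by
    unfold Dom_XE pvDomStr at hdom
    simp only [Bool.and_eq_true, List.all_eq_true] at hdom
    exact fun c hc => hdom.1 c hc
  have h128 : ∀ c ∈ source.toList, c.toNat < 128 := by
    intro c hc
    have := hall c hc
    unfold pvDomChar at this
    simp only [Bool.or_eq_true, Bool.and_eq_true, decide_eq_true_eq, beq_iff_eq] at this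
    rcases this with ((⟨h1, h2⟩ | h) | h) | h <;> omega
  unfold XE XE_alt
  simp only [List.map_map]
  rw [show (source.toList.map
        ((fun i =>
          if ¬ i.contains 'x'
          then pyChr ((PySem.Int.ofChars? (XE_k i)).getD 0)
          else pyChr ((PySem.Int.ofChars? (XE_k (PySem.List.slice i (some 1) none))).getD 0))
        ∘ ((fun i =>
          if PySem.List.pyGetD i (-1) ' ' ≠ '0'
          then PySem.List.pyGetD i (-1) ' ' :: PySem.List.slice i (some 0) (some 6)
          else 'x' :: PySem.List.slice i (some 0) (some 6))
        ∘ (fun i => XE_u ((i.toNat : Int))))))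
      = source.toList.map (fun c => Char.ofNat (64 * (c.toNat % 2) + c.toNat / 2)) from
    List.map_congr_left (fun c hc => rotChar_eq ⟨c.toNat, h128 c hc⟩)]
  have h2 := pv_index_loop_eq_enumerate
    (source.toList.map (fun c => Char.ofNat (64 * (c.toNat % 2) + c.toNat / 2))) ' '
    (fun i c =>
      if PySem.Int.mod i 2 = 1
      then pyChr (((c.toNat : Nat) : Int) - m)
      else pyChr (((c.toNat : Nat) : Int) + m))
  simp only at h2
  rw [h2, pv_enumerate_map, List.map_map]
  rw [List.map_congr_left (l := PySem.List.enumerate source.toList 0)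
    (fun p hp => by
      have hmem : p.2 ∈ source.toList := by
        rcases (PySem.List.mem_enumerate_iff _ _ _).mp hp with ⟨k, hk, rfl⟩
        simp
      exact pv_shift_eq m p.1 p.2 (h128 _ hmem))]
  rfl

-- ===== VERDICT (by name: the statement is the Claim_ definition above) =====
theorem XE_spec : Claim_equal_XE := by
  intro source m hdom _hpre
  unfold Spec_XE
  exact XE_eq_alt source m hdom
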